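-- pv_equiv track=rewrite | github.com/lwllvyb/sglang | python/sglang/multimodal_gen/runtime/managers/memory_managers/layerwise_offload_components.py | layerwise_component_matches_any_selection
-- ===== SOURCE A (Python) =====
-- from collections.abc import Collection, Sequence
--
-- LAYERWISE_OFFLOAD_TEXT_ENCODER_GROUP = "text_encoder"
--
-- LAYERWISE_OFFLOAD_VAE_GROUP = "vae"
--
-- DEFAULT_LAYERWISE_VAE_COMPONENT_NAMES = frozenset(
--     {
--         "vae",
--         "video_vae",
--         "condition_image_encoder",
--     }
-- )
--
-- def is_text_encoder_component_name(component_name: str) -> bool: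
--     return component_name.startswith("text_encoder") or component_name.endswith(
--         "text_encoder"
--     )
--
-- def layerwise_component_matches_selection(
--     component_name: str,
--     selected_component_name: str,
-- ) -> bool:
--     """if the provided component_name (unnormalized, e.g., text_encoder_2)  matches with the selected_component_name (normalized)"""
--     if selected_component_name == LAYERWISE_OFFLOAD_TEXT_ENCODER_GROUP:
--         return is_text_encoder_component_name(component_name)
--     if selected_component_name == LAYERWISE_OFFLOAD_VAE_GROUP:
--         # `vae` is a default-policy selector; AV-side decoders remain explicit-only
--         return component_name in DEFAULT_LAYERWISE_VAE_COMPONENT_NAMES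
--     return component_name == selected_component_name
--
-- def layerwise_component_matches_any_selection(
--     component_name: str,
--     selected_component_names: Collection[str],
-- ) -> bool:
--     return any(
--         layerwise_component_matches_selection(component_name, selected_component_name)
--         for selected_component_name in selected_component_names
--     )
-- ===== SOURCE B (Python) =====
-- def layerwise_component_matches_any_selection(component_name, selected_component_names):
--     # Compute once the set of selector names this component satisfies,
--     # then test the selection against it by membership.
--     matching = {component_name}
--     if component_name.startswith("text_encoder") or component_name.endswith("text_encoder"):
--         matching.add("text_encoder")
--     if component_name in ("vae", "video_vae", "condition_image_encoder"):
--         matching.add("vae")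
--     return not matching.isdisjoint(selected_component_names)
-- ===== Notes on version B (the rewrite author's own statement) =====
-- stated objective: alternative
-- what changed: B precomputes the set of selectors the component satisfies (itself, plus 'text_encoder'/'vae' when the group predicates hold) and returns a single set-disjointness test against the selection, instead of re-running the branching per-selector matcher for each selected name.
import Mathlib
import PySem

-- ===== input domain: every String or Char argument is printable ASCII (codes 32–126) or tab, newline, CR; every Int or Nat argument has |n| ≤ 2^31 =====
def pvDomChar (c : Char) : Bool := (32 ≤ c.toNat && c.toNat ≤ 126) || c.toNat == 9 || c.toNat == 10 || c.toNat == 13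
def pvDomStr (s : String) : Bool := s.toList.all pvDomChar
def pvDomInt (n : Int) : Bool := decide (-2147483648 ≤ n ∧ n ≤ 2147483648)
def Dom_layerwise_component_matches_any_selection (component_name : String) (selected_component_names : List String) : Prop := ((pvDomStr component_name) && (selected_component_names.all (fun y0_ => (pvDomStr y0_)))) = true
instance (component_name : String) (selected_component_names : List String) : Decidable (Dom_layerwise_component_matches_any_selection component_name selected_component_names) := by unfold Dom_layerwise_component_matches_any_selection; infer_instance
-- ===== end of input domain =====

-- B precomputes the set of selectors the component satisfies and tests the selection by a
-- single disjointness check (objective: alternative decomposition, same exact behaviour).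

-- ===== PORT A =====
def DEFAULT_LAYERWISE_VAE_COMPONENT_NAMES : PySem.Set String :=
  PySem.Set.ofList ["vae", "video_vae", "condition_image_encoder"]

def is_text_encoder_component_name (component_name : String) : Bool :=
  PySem.Str.startswith component_name "text_encoder" ||
    PySem.Str.endswith component_name "text_encoder"

def layerwise_component_matches_selection (component_name : String)
    (selected_component_name : String) : Bool :=
  if selected_component_name == "text_encoder" then
    is_text_encoder_component_name component_name
  else if selected_component_name == "vae" then
    PySem.Set.contains DEFAULT_LAYERWISE_VAE_COMPONENT_NAMES component_name
  else
    component_name == selected_component_name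

def layerwise_component_matches_any_selection (component_name : String) (selected_component_names : List String) : Bool :=
  selected_component_names.any (fun selected_component_name =>
    layerwise_component_matches_selection component_name selected_component_name)

-- ===== PORT B =====
-- the 'matching' set Source B builds before the disjointness test
def pvMatching (component_name : String) : PySem.Set String :=
  let matching : PySem.Set String := PySem.Set.ofList [component_name]
  let matching :=
    if PySem.Str.startswith component_name "text_encoder" ||
        PySem.Str.endswith component_name "text_encoder" then
      PySem.Set.add matching "text_encoder"
    else matching
  if component_name == "vae" || component_name == "video_vae" ||
      component_name == "condition_image_encoder" then
    PySem.Set.add matching "vae"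
  else matching

def layerwise_component_matches_any_selection_alt (component_name : String) (selected_component_names : List String) : Bool :=
  !(PySem.Set.isdisjoint (pvMatching component_name) selected_component_names)

-- ===== PRECONDITION & SPEC =====
def Spec_layerwise_component_matches_any_selection (component_name : String) (selected_component_names : List String) (out : Bool) : Prop := out = layerwise_component_matches_any_selection_alt component_name selected_component_names
instance (component_name : String) (selected_component_names : List String) (out : Bool) : Decidable (Spec_layerwise_component_matches_any_selection component_name selected_component_names out) := by unfold Spec_layerwise_component_matches_any_selection; infer_instance

-- ===== CLAIM (what is proved, stated in full; the proofs are below) =====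
def Claim_equal_layerwise_component_matches_any_selection : Prop := ∀ (component_name : String) (selected_component_names : List String), Dom_layerwise_component_matches_any_selection component_name selected_component_names → Spec_layerwise_component_matches_any_selection component_name selected_component_names (layerwise_component_matches_any_selection component_name selected_component_names)

-- ===== LEMMAS AND PROOFS =====
-- a name s is in Source B's 'matching' set iff A's per-selector matcher accepts it
set_option maxRecDepth 8192 in
theorem mem_pvMatching (cn s : String) :
    s ∈ pvMatching cn ↔ layerwise_component_matches_selection cn s = true := by
  unfold pvMatching layerwise_component_matches_selection is_text_encoder_component_name
  unfold DEFAULT_LAYERWISE_VAE_COMPONENT_NAMES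
  split_ifs with hvae hte hte <;>
    simp_all [PySem.Set.mem_add, PySem.Set.mem_ofList, PySem.Set.contains]
  all_goals try exact eq_comm
  all_goals try tauto
  all_goals intro h
  all_goals subst h
  all_goals
    simp_all [PySem.Chars.startswith, PySem.Chars.endswith]

-- ===== VERDICT (by name: the statement is the Claim_ definition above) =====
theorem layerwise_component_matches_any_selection_spec : Claim_equal_layerwise_component_matches_any_selection := by
  intro cn sel _
  show _ = _
  unfold layerwise_component_matches_any_selection layerwise_component_matches_any_selection_alt
  rw [Bool.eq_iff_iff]
  simp only [List.any_eq_true, Bool.not_eq_true',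
    ← Bool.not_eq_true (PySem.Set.isdisjoint _ _), PySem.Set.isdisjoint_iff]
  push Not
  constructor
  · rintro ⟨s, hs, hm⟩
    exact ⟨s, (mem_pvMatching cn s).mpr hm, hs⟩
  · rintro ⟨s, hm, hs⟩
    exact ⟨s, hs, (mem_pvMatching cn s).mp hm⟩
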